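-- pv_equiv track=rewrite | github.com/JSeungHyun/Algorithm | 프로그래머스/unrated/152995. 인사고과/인사고과.py | solution
-- ===== SOURCE A (Python) =====
-- def solution(scores):
--     wonScoreA = scores[0][0]
--     wonScoreB = scores[0][1]
--     wonScore = wonScoreA + wonScoreB # 원호 점수
--     scores.sort(key=lambda x: (-x[0], x[1]))
--     std, answer = 0, 1
--     for a,b in scores:
--         if wonScoreA < a and wonScoreB < b:
--             return -1
--         if std <= b:
--             if wonScore < a+b:
--                 answer += 1
--             std = b
--     return answer
-- ===== SOURCE B (Python) =====
-- def solution(scores):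
--     wa, wb = scores[0]
--     won = wa + wb
--     scores.sort(key=lambda x: (-x[0], x[1]))
--     if any(wa < a and wb < b for a, b in scores):
--         return -1
--     return 1 + sum(
--         1
--         for i, (a, b) in enumerate(scores)
--         if max([0] + [x[1] for x in scores[:i]]) <= b and won < a + b
--     )
-- ===== Notes on version B (the rewrite author's own statement) =====
-- stated objective: alternative
-- what changed: Replaces A's single running-max/early-return pass over the sorted list by an up-front any() domination check plus a nested comprehension that decides each employee's eligibility with an explicit scan over the earlier (higher-score) employees, counting incentive ranks with sum().
-- outside the precondition, e.g. on solution([[1, 2, 4], [5, 2], [8, 5]]): A returns -1, B raises ValueError; on solution([[1, 2, 3], [1, 2]]): A raises ValueError, B raises ValueError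
import Mathlib
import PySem

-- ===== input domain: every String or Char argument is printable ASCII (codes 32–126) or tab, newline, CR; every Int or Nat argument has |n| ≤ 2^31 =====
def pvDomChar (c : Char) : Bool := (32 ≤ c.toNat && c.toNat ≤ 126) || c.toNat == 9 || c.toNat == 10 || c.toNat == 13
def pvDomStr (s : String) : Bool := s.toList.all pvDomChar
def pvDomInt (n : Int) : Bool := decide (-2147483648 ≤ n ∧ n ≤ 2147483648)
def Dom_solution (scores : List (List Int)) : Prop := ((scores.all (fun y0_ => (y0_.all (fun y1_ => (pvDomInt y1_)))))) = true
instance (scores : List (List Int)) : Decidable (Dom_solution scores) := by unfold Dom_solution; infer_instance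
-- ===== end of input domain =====

-- B replaces A's single running-max pass by an explicit nested Pareto-domination scan (alternative
-- decomposition, same return value); both A and B sort the argument in place with the same key,
-- so the observable mutation also agrees and the equivalence here is about the return value.

-- ===== PORT A =====
-- sort key lambda x: (-x[0], x[1]); x[0]/x[1] ported with getD (exact on Pre_: all rows have length 2)
def pyKey1 (x : List Int) : Int := -(x.getD 0 0)
def pyKey2 (x : List Int) : Int := x.getD 1 0

def solLoopA (wa wb won : Int) : List (List Int) → Int → Int → Int
  | [], _, answer => answer
  | x :: rest, std, answer =>
    match x with
    | [a, b] =>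
      if wa < a ∧ wb < b then -1
      else if std ≤ b then
        solLoopA wa wb won rest b (if won < a + b then answer + 1 else answer)
      else
        solLoopA wa wb won rest std answer
    | _ => 0    -- Python: unpacking 'for a,b in scores' raises ValueError here (outside Pre_)

def solution (scores : List (List Int)) : Int :=
  match scores with
  | [] => 0     -- Python: scores[0] raises IndexError here (outside Pre_)
  | first :: _ =>
    let wa := first.getD 0 0   -- scores[0][0]; exact on Pre_ (rows have length 2)
    let wb := first.getD 1 0   -- scores[0][1]
    let won := wa + wb
    let s := PySem.List.sorted2 scores pyKey1 pyKey2
    solLoopA wa wb won s 0 1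

-- ===== PORT B =====
-- sum(1 for i,(a,b) in enumerate(scores) if max([0]+[x[1] for x in scores[:i]]) <= b and won < a+b)
def eligCount (won : Int) (s : List (List Int)) : Int :=
  ((PySem.List.enumerate s).map (fun p =>
    match p.2 with
    | [a, b] =>
      if ((s.take p.1.toNat).map (fun x => x.getD 1 0)).foldl max 0 ≤ b ∧ won < a + b
      then (1 : Int) else 0
    | _ => 0)).sum   -- Python: unpacking raises ValueError here (outside Pre_)

def solution_alt (scores : List (List Int)) : Int :=
  match scores with
  | [] => 0     -- Python: scores[0] raises IndexError here (outside Pre_)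
  | first :: _ =>
    match first with
    | [wa, wb] =>
      let won := wa + wb
      let s := PySem.List.sorted2 scores pyKey1 pyKey2
      if s.any (fun x => match x with
          | [a, b] => decide (wa < a) && decide (wb < b)
          | _ => false) then -1
      else 1 + eligCount won s
    | _ => 0    -- Python: 'wa, wb = scores[0]' raises ValueError here (outside Pre_)

-- ===== PRECONDITION & SPEC =====
-- Pre_ excludes the empty list (A raises IndexError on scores[0]) and inputs with a row whose
-- length is not 2: there A either raises (IndexError/ValueError) or, when a dominating pair sorts
-- before the malformed row, happens to early-return -1 — an accident of the loop order that B's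
-- up-front domination check does not reproduce (B raises unpacking the malformed row).
def Pre_solution (scores : List (List Int)) : Prop :=
  scores ≠ [] ∧ ∀ x ∈ scores, x.length = 2
instance (scores : List (List Int)) : Decidable (Pre_solution scores) := by
  unfold Pre_solution; infer_instance
def pvWitness_solution : List (List Int) := [[2, 2], [3, 1], [1, 4]]
def Spec_solution (scores : List (List Int)) (out : Int) : Prop := out = solution_alt scores
instance (scores : List (List Int)) (out : Int) : Decidable (Spec_solution scores out) := by unfold Spec_solution; infer_instance

-- ===== CLAIM (what is proved, stated in full; the proofs are below) =====
def Claim_equal_solution : Prop := ∀ (scores : List (List Int)), Dom_solution scores → Pre_solution scores → Spec_solution scores (solution scores)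

-- ===== LEMMAS AND PROOFS =====

-- A's running threshold/answer pass, characterised as a count
def cnt (won : Int) : List (List Int) → Int → Int
  | [], _ => 0
  | x :: rest, std =>
    (if std ≤ x.getD 1 0 ∧ won < x.getD 0 0 + x.getD 1 0 then 1 else 0)
      + cnt won rest (max std (x.getD 1 0))

theorem loopA_dom {wa wb won : Int} :
    ∀ (L : List (List Int)), (∀ x ∈ L, x.length = 2) →
    (∃ x ∈ L, wa < x.getD 0 0 ∧ wb < x.getD 1 0) →
    ∀ std ans, solLoopA wa wb won L std ans = -1 := by
  intro L
  induction L with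
  | nil => intro _ h; simp at h
  | cons x rest ih =>
    intro h2 hd std ans
    have hx2 := h2 x (by simp)
    match x, hx2 with
    | [a, b], _ =>
      simp only [solLoopA]
      by_cases hab : wa < a ∧ wb < b
      · simp [hab]
      · have hrest : ∃ y ∈ rest, wa < y.getD 0 0 ∧ wb < y.getD 1 0 := by
          rcases hd with ⟨y, hy, hdy⟩
          rcases List.mem_cons.mp hy with rfl | hy'
          · exact absurd (by simpa [List.getD] using hdy) hab
          · exact ⟨y, hy', hdy⟩
        simp only [if_neg hab]
        split_ifs <;>
          exact ih (fun z hz => h2 z (List.mem_cons_of_mem _ hz)) hrest _ _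

theorem loopA_clean {wa wb won : Int} :
    ∀ (L : List (List Int)), (∀ x ∈ L, x.length = 2) →
    (∀ x ∈ L, ¬(wa < x.getD 0 0 ∧ wb < x.getD 1 0)) →
    ∀ std ans, solLoopA wa wb won L std ans = ans + cnt won L std := by
  intro L
  induction L with
  | nil => intro _ _ std ans; simp [solLoopA, cnt]
  | cons x rest ih =>
    intro h2 hd std ans
    have hx2 := h2 x (by simp)
    match x, hx2 with
    | [a, b], _ =>
      have hab : ¬(wa < a ∧ wb < b) := by
        simpa [List.getD] using hd [a, b] (by simp)
      have ih' := ih (fun z hz => h2 z (List.mem_cons_of_mem _ hz))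
        (fun z hz => hd z (List.mem_cons_of_mem _ hz))
      simp only [solLoopA, if_neg hab]
      by_cases hstd : std ≤ b
      · rw [if_pos hstd, ih']
        have hm : max std b = b := max_eq_right hstd
        simp only [cnt, List.getD]
        simp [hstd]
        by_cases hwon : won < a + b
        · simp [hwon]; ring
        · simp [hwon]
      · rw [if_neg hstd, ih']
        have hm : max std b = std := max_eq_left (le_of_not_ge hstd)
        simp only [cnt, List.getD]
        simp [hm, hstd]

theorem enum_shift {α : Type} (xs : List α) (s : Int) :
    PySem.List.enumerate xs (s + 1)
      = (PySem.List.enumerate xs s).map (fun p => (p.1 + 1, p.2)) := by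
  induction xs generalizing s with
  | nil => simp [PySem.List.enumerate_nil]
  | cons x xs ih => simp [PySem.List.enumerate_cons, ih]

-- B's nested scan with the threshold-fold seeded at m
def sumB (won m : Int) (L : List (List Int)) : Int :=
  ((PySem.List.enumerate L).map (fun p =>
    match p.2 with
    | [a, b] =>
      if ((L.take p.1.toNat).map (fun x => x.getD 1 0)).foldl max m ≤ b ∧ won < a + b
      then (1 : Int) else 0
    | _ => 0)).sum

theorem sumB_eq_cnt {won : Int} :
    ∀ (L : List (List Int)), (∀ x ∈ L, x.length = 2) →
    ∀ m, sumB won m L = cnt won L m := by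
  intro L
  induction L with
  | nil => intro _ m; simp [sumB, cnt, PySem.List.enumerate_nil]
  | cons x rest ih =>
    intro h2 m
    have hx2 := h2 x (by simp)
    match x, hx2 with
    | [a, b], _ =>
      have hmap :
          ((PySem.List.enumerate rest 0).map ((fun p =>
              match p.2 with
              | [a', b'] =>
                if (((([a, b] :: rest).take p.1.toNat).map (fun x : List Int => x.getD 1 0)).foldl max m ≤ b'
                      ∧ won < a' + b')
                then (1 : Int) else 0
              | _ => 0) ∘ (fun p => (p.1 + 1, p.2))))
            = (PySem.List.enumerate rest 0).map (fun p =>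
              match p.2 with
              | [a', b'] =>
                if ((rest.take p.1.toNat).map (fun x : List Int => x.getD 1 0)).foldl max (max m b) ≤ b'
                      ∧ won < a' + b'
                then (1 : Int) else 0
              | _ => 0) := by
        apply List.map_congr_left
        intro p hp
        rcases (PySem.List.mem_enumerate_iff _ _ _).mp hp with ⟨k, hk, rfl⟩
        simp only [Function.comp]
        have htk : (((0:Int) + k + 1).toNat) = k + 1 := by omega
        rw [htk]
        simp [List.getD, List.foldl_cons]
      simp only [sumB, PySem.List.enumerate_cons, List.map_cons, List.sum_cons]
      rw [enum_shift, List.map_map, hmap]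
      have := ih (fun z hz => h2 z (List.mem_cons_of_mem _ hz)) (max m b)
      simp only [sumB] at this
      rw [this]
      simp [cnt, List.getD]

theorem solution_eq (scores : List (List Int)) (hpre : Pre_solution scores) :
    solution scores = solution_alt scores := by
  obtain ⟨hne, h2⟩ := hpre
  match scores, hne with
  | first :: rest, _ =>
    have hf2 := h2 first (by simp)
    match first, hf2 with
    | [wa, wb], _ =>
      have hperm := PySem.List.sorted2_perm ([wa, wb] :: rest) pyKey1 pyKey2 false
      have hs2 : ∀ x ∈ PySem.List.sorted2 ([wa, wb] :: rest) pyKey1 pyKey2, x.length = 2 :=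
        fun x hx => h2 x (hperm.mem_iff.mp hx)
      set s := PySem.List.sorted2 ([wa, wb] :: rest) pyKey1 pyKey2 with hs
      by_cases hdom : ∃ x ∈ s, wa < x.getD 0 0 ∧ wb < x.getD 1 0
      · -- both return -1
        have hA : solution ([wa, wb] :: rest) = -1 := by
          simp only [solution, List.getD]
          exact loopA_dom s hs2 hdom 0 1
        have hany : s.any (fun x => match x with
            | [a, b] => decide (wa < a) && decide (wb < b)
            | _ => false) = true := by
          rcases hdom with ⟨x, hx, hdx⟩
          have hx2 := hs2 x hx
          match x, hx2 with
          | [a, b], _ =>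
            refine List.any_eq_true.mpr ⟨[a, b], hx, ?_⟩
            simp [List.getD] at hdx
            simp [hdx]
        rw [hA]
        simp only [solution_alt]
        rw [if_pos hany]
      · rw [not_exists] at hdom
        simp only [not_and, not_lt] at hdom
        have hA : solution ([wa, wb] :: rest) = 1 + cnt (wa + wb) s 0 := by
          simp only [solution, List.getD]
          exact loopA_clean s hs2 (fun x hx h => absurd h.2 (not_lt.mpr (hdom x hx h.1))) 0 1
        have hany : s.any (fun x => match x with
            | [a, b] => decide (wa < a) && decide (wb < b)
            | _ => false) = false := by
          rw [List.any_eq_false]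
          intro x hx
          have hx2 := hs2 x hx
          match x, hx2 with
          | [a, b], _ =>
            have := hdom [a, b] hx
            simp [List.getD] at this
            by_cases h : wa < a
            · simp [h, this h]
            · simp [h]
        have hB : eligCount (wa + wb) s = cnt (wa + wb) s 0 := by
          have := sumB_eq_cnt (won := wa + wb) s hs2 0
          simpa [sumB, eligCount] using this
        rw [hA]
        simp only [solution_alt]
        rw [← hs, if_neg (by simp [hany]), hB]

-- ===== VERDICT (by name: the statement is the Claim_ definition above) =====
theorem solution_spec : Claim_equal_solution := by
  intro scores _ hpre
  unfold Spec_solution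
  exact solution_eq scores hpre
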